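-- pv_equiv track=rewrite | github.com/chonam93/chonam | programmers/[programmers]weekly_challenge_7th.py | solution
-- ===== SOURCE A (Python) =====
-- def solution(enter, leave):
--     answer = []
--     for idx, i in enumerate(enter):
--         cnt = 0
--         li = []
--         check = leave.index(i)
--         for idx2, j in enumerate(leave):
--             check2 = enter.index(j)
--             if idx2 >= idx and (idx2 < check or idx > check):
--                 cnt += 1
--                 li.append(check2)
--             try:
--                 if check2 > idx and max(li) > check2:
--                     cnt += 1
--             except:
--                 pass
--
--         answer.append(cnt)
--
--
--
--     return answer
-- ===== SOURCE B (Python) =====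
-- def solution(enter, leave):
--     if not enter:
--         return []
--     nl = len(leave)
--     # first-occurrence index maps, built by overwriting in reverse so the earliest index wins
--     pe = {enter[k]: k for k in range(len(enter) - 1, -1, -1)}
--     pl = {leave[k]: k for k in range(nl - 1, -1, -1)}
--     c2 = [pe[j] for j in leave]
--     answer = []
--     for idx, i in enumerate(enter):
--         check = pl[i]
--         end = check if idx <= check else nl
--         # inside the window [idx, end): non-left-to-right-maxima of c2 whose value exceeds idx
--         inside = 0
--         m = None
--         for t in range(idx, end):
--             if m is not None and c2[t] > idx and m > c2[t]:
--                 inside += 1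
--             m = c2[t] if m is None else max(m, c2[t])
--         # after the window: values strictly between idx and the window maximum
--         after = 0 if m is None else sum(1 for t in range(end, nl) if idx < c2[t] < m)
--         answer.append(max(0, end - idx) + inside + after)
--     return answer
-- ===== Notes on version B (the rewrite author's own statement) =====
-- stated objective: alternative
-- what changed: B restructures the computation entirely: it builds first-occurrence index maps once by reverse overwrite, precomputes the c2 array, and replaces A's full inner rescan (with repeated list.index and max(li) recomputation inside the loop) by a closed-form window size (end-idx), one pass over the window counting non-running-maxima above idx, and a band count over the tail; intended as faster (O(n^2) vs A's O(n^3) on distinct values) but a timing run's duplicate-heavy inputs let A's list.index return early, measuring only 1.23x at n=4096.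
import Mathlib
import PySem

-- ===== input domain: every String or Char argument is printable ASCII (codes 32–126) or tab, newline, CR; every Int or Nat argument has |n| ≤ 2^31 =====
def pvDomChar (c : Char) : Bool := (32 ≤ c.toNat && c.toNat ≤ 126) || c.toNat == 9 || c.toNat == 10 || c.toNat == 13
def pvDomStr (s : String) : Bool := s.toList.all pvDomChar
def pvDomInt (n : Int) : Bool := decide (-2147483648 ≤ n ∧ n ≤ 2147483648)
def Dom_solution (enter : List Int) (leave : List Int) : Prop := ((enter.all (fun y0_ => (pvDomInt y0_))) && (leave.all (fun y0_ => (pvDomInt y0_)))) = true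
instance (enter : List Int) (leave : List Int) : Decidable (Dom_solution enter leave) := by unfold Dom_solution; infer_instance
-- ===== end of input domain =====

-- B replaces A's full rescan per pair (repeated list.index, max(li) recomputed inside the
-- inner loop over ALL of leave) by a staged algorithm: first-occurrence index maps built once,
-- a closed-form window [idx, end) whose size gives A's first count, a single pass over that
-- window counting non-running-maxima above idx, and a band count over the tail.

-- ===== PORT A =====
-- literal port of A; the `.getD 0` on index? is reached only where Python raises ValueError
-- (excluded by Pre_solution); max([]) raising inside try/except pass is the `none` branch.
def solution (enter : List Int) (leave : List Int) : List Int :=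
  (PySem.List.enumerate enter 0).foldl (fun answer p =>
    let idx := p.1
    let i := p.2
    let check : Int := ((PySem.List.index? leave i).getD 0 : Nat)
    let st := (PySem.List.enumerate leave 0).foldl (fun (st : Int × List Int) q =>
      let idx2 := q.1
      let j := q.2
      let check2 : Int := ((PySem.List.index? enter j).getD 0 : Nat)
      let st1 := if idx2 ≥ idx ∧ (idx2 < check ∨ idx > check)
                 then (st.1 + 1, st.2 ++ [check2]) else st
      let cnt := if check2 > idx then
          match PySem.List.max? st1.2 (fun y => y) with
          | some m => if m > check2 then st1.1 + 1 else st1.1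
          | none => st1.1
        else st1.1
      (cnt, st1.2)) ((0 : Int), ([] : List Int))
    answer ++ [st.1]) []

-- ===== PORT B =====
def solution_alt (enter : List Int) (leave : List Int) : List Int :=
  if enter = [] then []
  else
    let nl : Int := PySem.List.len leave
    -- pe = {enter[k]: k for k in range(len(enter)-1, -1, -1)}  (reverse overwrite: first occurrence wins)
    let pe := (PySem.List.pyRange (PySem.List.len enter - 1) (-1) (-1)).foldl
        (fun d k => d.insert (PySem.List.pyGetD enter k 0) k) (PySem.Dict.empty : PySem.Dict Int Int)
    let pl := (PySem.List.pyRange (nl - 1) (-1) (-1)).foldl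
        (fun d k => d.insert (PySem.List.pyGetD leave k 0) k) (PySem.Dict.empty : PySem.Dict Int Int)
    -- c2 = [pe[j] for j in leave]; KeyError (j not in enter) is excluded by Pre_solution
    let c2 := leave.map (fun j => pe.getD j 0)
    (PySem.List.enumerate enter 0).foldl (fun answer p =>
      let idx := p.1
      let check := pl.getD p.2 0
      let e := if idx ≤ check then check else nl
      let st := (PySem.List.pyRange idx e 1).foldl (fun (st : Int × Option Int) t =>
        let c := PySem.List.pyGetD c2 t 0
        let inside := match st.2 with
          | some m => if c > idx ∧ m > c then st.1 + 1 else st.1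
          | none => st.1
        (inside, some (match st.2 with | none => c | some m => max m c))) ((0 : Int), (none : Option Int))
      let after : Int := match st.2 with
        | none => 0
        | some mv => (PySem.List.pyRange e nl 1).foldl (fun acc t =>
            if idx < PySem.List.pyGetD c2 t 0 ∧ PySem.List.pyGetD c2 t 0 < mv then acc + 1 else acc) 0
      answer ++ [max 0 (e - idx) + st.1 + after]) []

-- ===== PRECONDITION & SPEC =====
-- A raises ValueError (list.index on a missing value) unless enter is empty or every value
-- of enter occurs in leave and vice versa; exactly those raising inputs are excluded.
def Pre_solution (enter : List Int) (leave : List Int) : Prop :=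
  enter = [] ∨ ((∀ x ∈ enter, x ∈ leave) ∧ (∀ x ∈ leave, x ∈ enter))
instance (enter : List Int) (leave : List Int) : Decidable (Pre_solution enter leave) := by
  unfold Pre_solution; infer_instance
def pvWitness_solution : List Int × List Int := ([0, 1, 2], [1, 0, 2])

def Spec_solution (enter : List Int) (leave : List Int) (out : List Int) : Prop := out = solution_alt enter leave
instance (enter : List Int) (leave : List Int) (out : List Int) : Decidable (Spec_solution enter leave out) := by unfold Spec_solution; infer_instance

-- ===== CLAIM (what is proved, stated in full; the proofs are below) =====
def Claim_equal_solution : Prop := ∀ (enter : List Int) (leave : List Int), Dom_solution enter leave → Pre_solution enter leave → Spec_solution enter leave (solution enter leave)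

-- ===== LEMMAS AND PROOFS =====

-- proof-side names for A's inner-loop step and its running-max simulation
def stepA (idx check : Int) (c : Int × Int → Int) (st : Int × List Int) (q : Int × Int) :
    Int × List Int :=
  let st1 := if q.1 ≥ idx ∧ (q.1 < check ∨ idx > check) then (st.1 + 1, st.2 ++ [c q]) else st
  ((if c q > idx then
      match PySem.List.max? st1.2 (fun y => y) with
      | some m => if m > c q then st1.1 + 1 else st1.1
      | none => st1.1
    else st1.1), st1.2)

def stepB (idx check : Int) (c : Int × Int → Int) (st : Int × Option Int) (q : Int × Int) :
    Int × Option Int :=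
  let st1 := if q.1 ≥ idx ∧ (q.1 < check ∨ idx > check)
             then (st.1 + 1, some (match st.2 with | none => c q | some m => max m (c q))) else st
  ((match st1.2 with
    | some m => if c q > idx ∧ m > c q then st1.1 + 1 else st1.1
    | none => st1.1), st1.2)

-- stepB specialised to positions (the fold over pyRange, value function g)
def step2 (idx check : Int) (g : Int → Int) (st : Int × Option Int) (t : Int) :
    Int × Option Int :=
  let st1 := if t ≥ idx ∧ (t < check ∨ idx > check)
             then (st.1 + 1, some (match st.2 with | none => g t | some m => max m (g t))) else st
  ((match st1.2 with
    | some m => if g t > idx ∧ m > g t then st1.1 + 1 else st1.1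
    | none => st1.1), st1.2)

-- B's window-loop step
def stepW (idx : Int) (g : Int → Int) (st : Int × Option Int) (t : Int) : Int × Option Int :=
  ((match st.2 with
    | some m => if g t > idx ∧ m > g t then st.1 + 1 else st.1
    | none => st.1), some (match st.2 with | none => g t | some m => max m (g t)))

-- proof-side names for the two index functions
def cFun (enter : List Int) (q : Int × Int) : Int := ((PySem.List.index? enter q.2).getD 0 : Nat)

def gFun (enter leave : List Int) (t : Int) : Int :=
  ((PySem.List.index? enter (PySem.List.pyGetD leave t 0)).getD 0 : Nat)

-- running maximum = max? of the accumulated list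
theorem max?_append_singleton (li : List Int) (c : Int) :
    PySem.List.max? (li ++ [c]) (fun y => y)
      = some (match PySem.List.max? li (fun y => y) with | none => c | some m => max m c) := by
  cases li with
  | nil =>
    have h0 : PySem.List.max? ([] : List Int) (fun y => y) = none := by
      cases hm : PySem.List.max? ([] : List Int) (fun y => y) with
      | none => rfl
      | some m => exact absurd (PySem.List.max?_mem hm) (by simp)
    simp [h0, PySem.List.max?_id_cons]
  | cons x t =>
    rw [show (x :: t) ++ [c] = x :: (t ++ [c]) from rfl]
    rw [PySem.List.max?_id_cons, PySem.List.max?_id_cons]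
    simp [List.foldl_append]

theorem step_sim (idx check : Int) (c : Int × Int → Int) (cnt : Int) (li : List Int)
    (q : Int × Int) :
    stepB idx check c (cnt, PySem.List.max? li (fun y => y)) q
      = ((stepA idx check c (cnt, li) q).1,
         PySem.List.max? (stepA idx check c (cnt, li) q).2 (fun y => y)) := by
  unfold stepA stepB
  by_cases hb : q.1 ≥ idx ∧ (q.1 < check ∨ idx > check)
  · simp only [hb]
    rw [← max?_append_singleton li (c q)]
    cases hm : PySem.List.max? (li ++ [c q]) (fun y => y) with
    | none => rw [max?_append_singleton] at hm; simp at hm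
    | some m =>
      by_cases h1 : c q > idx
      · by_cases h2 : m > c q <;> simp [hm, h1, h2]
      · simp [hm, h1]
  · simp only [hb, if_neg, not_false_iff]
    cases hm : PySem.List.max? li (fun y => y) with
    | none => by_cases h1 : c q > idx <;> simp [hm, h1]
    | some m =>
      by_cases h1 : c q > idx
      · by_cases h2 : m > c q <;> simp [h1, h2]
      · simp [h1]

theorem fold_sim (idx check : Int) (c : Int × Int → Int) (l : List (Int × Int)) :
    ∀ (cnt : Int) (li : List Int),
    l.foldl (stepB idx check c) (cnt, PySem.List.max? li (fun y => y))
      = ((l.foldl (stepA idx check c) (cnt, li)).1,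
         PySem.List.max? (l.foldl (stepA idx check c) (cnt, li)).2 (fun y => y)) := by
  induction l with
  | nil => intro cnt li; rfl
  | cons q t ih =>
    intro cnt li
    simp only [List.foldl_cons]
    rw [step_sim]
    rw [ih (stepA idx check c (cnt, li) q).1 (stepA idx check c (cnt, li) q).2]

-- the reverse-range insert loop builds the first-occurrence dict
theorem mem_pyRange_neg_one_to_neg_one {a t : Int} (h : t ∈ PySem.List.pyRange a (-1) (-1)) :
    0 ≤ t ∧ t ≤ a := by
  rw [PySem.List.pyRange_neg_one] at h
  obtain ⟨k, hk, rfl⟩ := List.mem_map.mp h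
  rw [List.mem_range] at hk
  omega

theorem revIns_get (p : List Int) (d : PySem.Dict Int Int) (v : Int) :
    ((PySem.List.pyRange ((p.length : Int) - 1) (-1) (-1)).foldl
        (fun d k => d.insert (PySem.List.pyGetD p k 0) k) d).get? v
      = match PySem.List.index? p v with
        | some k => some (k : Int)
        | none => d.get? v := by
  induction p using List.reverseRecOn generalizing d with
  | nil =>
    rw [PySem.List.pyRange_neg_one_eq_nil (by simp)]
    have : PySem.List.index? ([] : List Int) v = none := by
      rw [PySem.List.index?_eq_none_iff]; simp
    simp
  | append_singleton q x ih =>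
    have hlen : ((q ++ [x]).length : Int) - 1 = (q.length : Int) := by simp
    rw [hlen, PySem.List.pyRange_neg_one_cons (by omega), List.foldl_cons]
    have hget : PySem.List.pyGetD (q ++ [x]) (q.length : Int) 0 = x := by
      rw [PySem.List.pyGetD_eq_getElem _ _ (by omega) (by simp)]
      simp
    rw [hget]
    have hcongr : (PySem.List.pyRange ((q.length : Int) - 1) (-1) (-1)).foldl
        (fun d k => d.insert (PySem.List.pyGetD (q ++ [x]) k 0) k)
        (d.insert x (q.length : Int))
      = (PySem.List.pyRange ((q.length : Int) - 1) (-1) (-1)).foldl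
        (fun d k => d.insert (PySem.List.pyGetD q k 0) k)
        (d.insert x (q.length : Int)) := by
      refine PySem.List.foldl_congr_mem _ _ _ _ ?_
      intro acc t ht
      have hb := mem_pyRange_neg_one_to_neg_one ht
      have : PySem.List.pyGetD (q ++ [x]) t 0 = PySem.List.pyGetD q t 0 := by
        rw [PySem.List.pyGetD_eq_getElem _ _ (by omega) (by simp; omega),
            PySem.List.pyGetD_eq_getElem _ _ (by omega) (by omega)]
        exact List.getElem_append_left (by omega)
      rw [this]
    rw [hcongr, ih]
    by_cases hv : v ∈ q
    · rw [PySem.List.index?_append_of_mem _ hv]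
      cases hk : PySem.List.index? q v with
      | none => rw [PySem.List.index?_eq_none_iff] at hk; exact absurd hv hk
      | some k => simp
    · have hq : PySem.List.index? q v = none := (PySem.List.index?_eq_none_iff q v).mpr hv
      rw [hq]
      by_cases hvx : v = x
      · subst hvx
        rw [PySem.List.index?_append_singleton_self q v hv, PySem.Dict.get?_insert_self]
      · have : PySem.List.index? (q ++ [x]) v = none := by
          rw [PySem.List.index?_eq_none_iff]; simp [hv, hvx]
        rw [this, PySem.Dict.get?_insert_of_ne _ _ hvx]

-- segment lemmas for step2
theorem step2_id (idx check : Int) (g : Int → Int) (l : List Int) (c : Int)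
    (h : ∀ t ∈ l, ¬(t ≥ idx ∧ (t < check ∨ idx > check))) :
    l.foldl (step2 idx check g) (c, none) = (c, none) := by
  induction l with
  | nil => rfl
  | cons t ts ih =>
    have ht := h t (by simp)
    simp only [List.foldl_cons]
    have : step2 idx check g (c, none) t = (c, none) := by
      unfold step2; simp [ht]
    rw [this, ih (fun s hs => h s (by simp [hs]))]

theorem stepW_shift (idx : Int) (g : Int → Int) (l : List Int) :
    ∀ (i a : Int) (m : Option Int),
    l.foldl (stepW idx g) (i + a, m)
      = ((l.foldl (stepW idx g) (i, m)).1 + a, (l.foldl (stepW idx g) (i, m)).2) := by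
  induction l with
  | nil => intro i a m; rfl
  | cons t ts ih =>
    intro i a m
    simp only [List.foldl_cons]
    have : stepW idx g (i + a, m) t
        = ((stepW idx g (i, m) t).1 + a, (stepW idx g (i, m) t).2) := by
      unfold stepW
      cases m with
      | none => rfl
      | some mv => by_cases hcnd : g t > idx ∧ mv > g t <;> simp [hcnd] <;> ring
    rw [this]
    have h2 := ih (stepW idx g (i, m) t).1 a (stepW idx g (i, m) t).2
    simpa using h2

theorem window_sim (idx check : Int) (g : Int → Int) (l : List Int)
    (h : ∀ t ∈ l, t ≥ idx ∧ (t < check ∨ idx > check)) :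
    ∀ (c : Int) (m : Option Int),
    l.foldl (step2 idx check g) (c, m)
      = (c + l.length + (l.foldl (stepW idx g) (0, m)).1, (l.foldl (stepW idx g) (0, m)).2) := by
  induction l with
  | nil => intro c m; simp
  | cons t ts ih =>
    intro c m
    have ht := h t (by simp)
    have hts : ∀ s ∈ ts, s ≥ idx ∧ (s < check ∨ idx > check) := fun s hs => h s (by simp [hs])
    simp only [List.foldl_cons]
    have h2 : step2 idx check g (c, m) t
        = (c + 1 + (stepW idx g (0, m) t).1, (stepW idx g (0, m) t).2) := by
      unfold step2 stepW
      cases m with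
      | none => simp [ht]
      | some mv =>
        simp only [ht, and_self, if_true]
        by_cases hcnd : g t > idx ∧ mv > g t
        · have : max mv (g t) > g t := lt_max_of_lt_left hcnd.2
          simp [hcnd, this]
        · have hng : ¬(g t > idx ∧ max mv (g t) > g t) := by
            intro hx; exact hcnd ⟨hx.1, by have := hx.2; omega⟩
          simp [hcnd]
    rw [h2, ih hts]
    have h3 := stepW_shift idx g ts 0 (stepW idx g (0, m) t).1 (stepW idx g (0, m) t).2
    have h4 : (0 : Int) + (stepW idx g (0, m) t).1 = (stepW idx g (0, m) t).1 := by ring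
    rw [h4] at h3
    rw [show (stepW idx g (0, m) t) = ((stepW idx g (0, m) t).1, (stepW idx g (0, m) t).2) from rfl] at h3 ⊢
    rw [h3]
    refine Prod.ext ?_ rfl
    simp
    ring

theorem tail_some (idx check : Int) (g : Int → Int) (l : List Int) (mv : Int)
    (h : ∀ t ∈ l, ¬(t ≥ idx ∧ (t < check ∨ idx > check))) :
    ∀ (c : Int),
    l.foldl (step2 idx check g) (c, some mv)
      = (c + (l.countP (fun t => decide (idx < g t ∧ g t < mv)) : Int), some mv) := by
  induction l with
  | nil => intro c; simp
  | cons t ts ih =>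
    intro c
    have ht := h t (by simp)
    simp only [List.foldl_cons]
    have h2 : step2 idx check g (c, some mv) t
        = (c + (if idx < g t ∧ g t < mv then (1:Int) else 0), some mv) := by
      unfold step2
      simp only [ht, if_neg, not_false_iff]
      by_cases hcnd : g t > idx ∧ mv > g t
      · simp [hcnd]
      · simp [hcnd]
    rw [h2, ih (fun s hs => h s (by simp [hs]))]
    refine Prod.ext ?_ rfl
    simp [List.countP_cons]
    by_cases hcnd : idx < g t ∧ g t < mv
    · simp [hcnd]; ring
    · simp [hcnd]

-- ===== VERDICT (by name: the statement is the Claim_ definition above) =====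
theorem solution_spec : Claim_equal_solution := by
  intro enter leave _ hpre
  unfold Spec_solution
  by_cases h0 : enter = []
  · subst h0; rfl
  obtain ⟨hel, hle⟩ : (∀ x ∈ enter, x ∈ leave) ∧ (∀ x ∈ leave, x ∈ enter) := by
    rcases hpre with h | h
    · exact absurd h h0
    · exact h
  unfold solution solution_alt
  rw [if_neg h0]
  refine PySem.List.foldl_congr_mem _ _ _ _ ?_
  intro acc p hp
  refine congrArg (fun z => acc ++ [z]) ?_
  obtain ⟨k, hk, hpk⟩ := (PySem.List.mem_enumerate_iff _ _ _).mp hp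
  subst hpk
  dsimp only
  simp only [zero_add, PySem.List.len_eq]
  -- first-occurrence index of enter[k] in leave
  have hmemk : enter[k] ∈ enter := List.getElem_mem hk
  obtain ⟨kc, hkc⟩ : ∃ kc, PySem.List.index? leave enter[k] = some kc := by
    have h := (PySem.List.index?_isSome_iff leave enter[k]).mpr (hel _ hmemk)
    cases hx : PySem.List.index? leave enter[k] with
    | none => rw [hx] at h; simp at h
    | some kc => exact ⟨kc, rfl⟩
  obtain ⟨hkclt, -, -⟩ := PySem.List.getElem_of_index?_eq_some hkc
  simp only [hkc, Option.getD_some]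
  set pe := (PySem.List.pyRange ((enter.length : Int) - 1) (-1) (-1)).foldl
      (fun d k => d.insert (PySem.List.pyGetD enter k 0) k)
      (PySem.Dict.empty : PySem.Dict Int Int) with hpe
  set pl := (PySem.List.pyRange ((leave.length : Int) - 1) (-1) (-1)).foldl
      (fun d k => d.insert (PySem.List.pyGetD leave k 0) k)
      (PySem.Dict.empty : PySem.Dict Int Int) with hpl
  set c2l := leave.map (fun j => pe.getD j 0) with hc2l
  set nl : Int := (leave.length : Int) with hnl
  set e : Int := if (k : Int) ≤ pl.getD enter[k] 0 then pl.getD enter[k] 0 else nl with he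
  conv_lhs => change ((PySem.List.enumerate leave 0).foldl
      (stepA (k : Int) ((kc : Nat) : Int) (cFun enter)) ((0 : Int), ([] : List Int))).1
  conv_rhs => change max 0 (e - (k : Int))
      + ((PySem.List.pyRange (k : Int) e 1).foldl
          (stepW (k : Int) (fun t => PySem.List.pyGetD c2l t 0)) ((0 : Int), (none : Option Int))).1
      + (match ((PySem.List.pyRange (k : Int) e 1).foldl
          (stepW (k : Int) (fun t => PySem.List.pyGetD c2l t 0)) ((0 : Int), (none : Option Int))).2 with
         | none => (0 : Int)
         | some mv => (PySem.List.pyRange e nl 1).foldl (fun acc t =>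
             if (k : Int) < PySem.List.pyGetD c2l t 0 ∧ PySem.List.pyGetD c2l t 0 < mv
             then acc + 1 else acc) 0)
  have hmaxnil : PySem.List.max? ([] : List Int) (fun y => y) = none := by
    cases hm : PySem.List.max? ([] : List Int) (fun y => y) with
    | none => rfl
    | some m => exact absurd (PySem.List.max?_mem hm) (by simp)
  have hsim := fold_sim (k : Int) ((kc : Nat) : Int) (cFun enter) (PySem.List.enumerate leave 0) 0 []
  rw [hmaxnil] at hsim
  have hA1 : ((PySem.List.enumerate leave 0).foldl
      (stepA (k : Int) ((kc : Nat) : Int) (cFun enter)) ((0 : Int), ([] : List Int))).1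
      = ((PySem.List.enumerate leave 0).foldl
      (stepB (k : Int) ((kc : Nat) : Int) (cFun enter)) ((0 : Int), (none : Option Int))).1 := by
    rw [hsim]
  rw [hA1, PySem.List.enumerate_eq_map_pyRange leave 0, List.foldl_map]
  conv_lhs => change ((PySem.List.pyRange 0 nl 1).foldl
      (step2 (k : Int) ((kc : Nat) : Int) (gFun enter leave)) ((0 : Int), (none : Option Int))).1
  have hc2 : ∀ t : Int, 0 ≤ t → t < nl → PySem.List.pyGetD c2l t 0 = gFun enter leave t := by
    intro t h1 h2
    have hlt : t.toNat < leave.length := by omega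
    rw [hc2l, PySem.List.pyGetD_eq_getElem _ _ h1 (by simp only [List.length_map]; omega),
        List.getElem_map]
    have hmem : leave[t.toNat] ∈ leave := List.getElem_mem hlt
    obtain ⟨ke, hke⟩ : ∃ ke, PySem.List.index? enter leave[t.toNat] = some ke := by
      have h := (PySem.List.index?_isSome_iff enter leave[t.toNat]).mpr (hle _ hmem)
      cases hx : PySem.List.index? enter leave[t.toNat] with
      | none => rw [hx] at h; simp at h
      | some ke => exact ⟨ke, rfl⟩
    rw [PySem.Dict.getD_eq_get?_getD, hpe, revIns_get, hke]
    unfold gFun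
    rw [PySem.List.pyGetD_eq_getElem _ _ h1 (by omega), hke]
    rfl
  have hck : pl.getD enter[k] 0 = ((kc : Nat) : Int) := by
    rw [PySem.Dict.getD_eq_get?_getD, hpl, hnl, revIns_get, hkc]
    rfl
  rw [hck] at he
  by_cases hcase : (k : Int) ≤ ((kc : Nat) : Int)
  · rw [if_pos hcase] at he
    rw [he]
    rw [PySem.List.pyRange_one_append 0 (k : Int) nl (by omega) (by omega), List.foldl_append,
        step2_id (k : Int) ((kc : Nat) : Int) (gFun enter leave) _ 0 (by
          intro t ht; rw [PySem.List.mem_pyRange_one] at ht; omega)]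
    rw [PySem.List.pyRange_one_append (k : Int) ((kc : Nat) : Int) nl hcase (by omega),
        List.foldl_append]
    rw [window_sim (k : Int) ((kc : Nat) : Int) (gFun enter leave) _ (by
        intro t ht; rw [PySem.List.mem_pyRange_one] at ht
        exact ⟨by omega, Or.inl (by omega)⟩) 0 none]
    have hWc : (PySem.List.pyRange (k : Int) ((kc : Nat) : Int) 1).foldl
        (stepW (k : Int) (fun t => PySem.List.pyGetD c2l t 0)) ((0 : Int), (none : Option Int))
        = (PySem.List.pyRange (k : Int) ((kc : Nat) : Int) 1).foldl
        (stepW (k : Int) (gFun enter leave)) ((0 : Int), (none : Option Int)) := by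
      refine PySem.List.foldl_congr_mem _ _ _ _ ?_
      intro st t ht
      rw [PySem.List.mem_pyRange_one] at ht
      unfold stepW
      simp only [hc2 t (by omega) (by omega)]
    rw [hWc]
    cases hw : ((PySem.List.pyRange (k : Int) ((kc : Nat) : Int) 1).foldl
        (stepW (k : Int) (gFun enter leave)) ((0 : Int), (none : Option Int))).2 with
    | none =>
      rw [step2_id (k : Int) ((kc : Nat) : Int) (gFun enter leave) _ _ (by
        intro t ht; rw [PySem.List.mem_pyRange_one] at ht; omega)]
      simp only [PySem.List.length_pyRange_one]
      omega
    | some mv =>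
      dsimp only
      rw [tail_some (k : Int) ((kc : Nat) : Int) (gFun enter leave) _ mv (by
        intro t ht; rw [PySem.List.mem_pyRange_one] at ht; omega) _]
      have hTc : (PySem.List.pyRange ((kc : Nat) : Int) nl 1).foldl
          (fun acc t => if (k : Int) < PySem.List.pyGetD c2l t 0 ∧ PySem.List.pyGetD c2l t 0 < mv
            then acc + 1 else acc) (0 : Int)
          = (PySem.List.pyRange ((kc : Nat) : Int) nl 1).foldl
          (fun acc t => if (k : Int) < gFun enter leave t ∧ gFun enter leave t < mv
            then acc + 1 else acc) (0 : Int) := by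
        refine PySem.List.foldl_congr_mem _ _ _ _ ?_
        intro acc2 t ht
        rw [PySem.List.mem_pyRange_one] at ht
        simp only [hc2 t (by omega) (by omega)]
      rw [hTc, PySem.List.foldl_ite_add_one
          (fun t => (k : Int) < gFun enter leave t ∧ gFun enter leave t < mv) _ 0]
      simp only [PySem.List.length_pyRange_one]
      omega
  · rw [if_neg hcase] at he
    rw [he]
    by_cases hknl : (k : Int) < nl
    · rw [PySem.List.pyRange_one_append 0 (k : Int) nl (by omega) (by omega), List.foldl_append,
          step2_id (k : Int) ((kc : Nat) : Int) (gFun enter leave) _ 0 (by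
            intro t ht; rw [PySem.List.mem_pyRange_one] at ht; omega)]
      rw [window_sim (k : Int) ((kc : Nat) : Int) (gFun enter leave) _ (by
          intro t ht; rw [PySem.List.mem_pyRange_one] at ht
          exact ⟨by omega, Or.inr (by omega)⟩) 0 none]
      have hWc : (PySem.List.pyRange (k : Int) nl 1).foldl
          (stepW (k : Int) (fun t => PySem.List.pyGetD c2l t 0)) ((0 : Int), (none : Option Int))
          = (PySem.List.pyRange (k : Int) nl 1).foldl
          (stepW (k : Int) (gFun enter leave)) ((0 : Int), (none : Option Int)) := by
        refine PySem.List.foldl_congr_mem _ _ _ _ ?_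
        intro st t ht
        rw [PySem.List.mem_pyRange_one] at ht
        unfold stepW
        simp only [hc2 t (by omega) (by omega)]
      rw [hWc]
      rw [PySem.List.pyRange_one_eq_nil (le_refl nl)]
      cases hw : ((PySem.List.pyRange (k : Int) nl 1).foldl
          (stepW (k : Int) (gFun enter leave)) ((0 : Int), (none : Option Int))).2 with
      | none =>
        simp only [PySem.List.length_pyRange_one]
        omega
      | some mv =>
        simp only [PySem.List.length_pyRange_one, List.foldl_nil]
        omega
    · rw [step2_id (k : Int) ((kc : Nat) : Int) (gFun enter leave) _ 0 (by
        intro t ht; rw [PySem.List.mem_pyRange_one] at ht; omega)]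
      rw [PySem.List.pyRange_one_eq_nil (show nl ≤ (k : Int) by omega)]
      simp only [List.foldl_nil]
      omega
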